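-- pv_equiv track=rewrite | github.com/cybermcs/scanner | scanner_v2GUI.py | _parse_varint_buf
-- ===== SOURCE A (Python) =====
-- def _parse_varint_buf(data, offset=0):
--     result = 0
--     for i in range(5):
--         if offset >= len(data):
--             raise ValueError("buffer too short")
--         val = data[offset]; offset += 1
--         result |= (val & 0x7F) << (7 * i)
--         if not (val & 0x80):
--             return result, offset
--     raise ValueError("varint too long")
-- ===== SOURCE B (Python) =====
-- def _parse_varint_buf(data, offset=0):
--     # Pass 1: collect the 7-bit payloads; pass 2: combine them.
--     payloads = []
--     while True:
--         if offset >= len(data):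
--             raise ValueError("buffer too short")
--         val = data[offset]
--         offset += 1
--         payloads.append(val & 0x7F)
--         if not (val & 0x80):
--             break
--         if len(payloads) >= 5:
--             raise ValueError("varint too long")
--     result = sum(p << (7 * i) for i, p in enumerate(payloads))
--     return result, offset
-- ===== Notes on version B (the rewrite author's own statement) =====
-- stated objective: alternative
-- what changed: A builds the result with interleaved or-shift accumulation inside one bounded for-loop; B is a collect-then-combine two-pass: first consume bytes into a list of 7-bit payloads, then fold them with sum(p << 7*i) over enumerate.
import Mathlib
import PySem

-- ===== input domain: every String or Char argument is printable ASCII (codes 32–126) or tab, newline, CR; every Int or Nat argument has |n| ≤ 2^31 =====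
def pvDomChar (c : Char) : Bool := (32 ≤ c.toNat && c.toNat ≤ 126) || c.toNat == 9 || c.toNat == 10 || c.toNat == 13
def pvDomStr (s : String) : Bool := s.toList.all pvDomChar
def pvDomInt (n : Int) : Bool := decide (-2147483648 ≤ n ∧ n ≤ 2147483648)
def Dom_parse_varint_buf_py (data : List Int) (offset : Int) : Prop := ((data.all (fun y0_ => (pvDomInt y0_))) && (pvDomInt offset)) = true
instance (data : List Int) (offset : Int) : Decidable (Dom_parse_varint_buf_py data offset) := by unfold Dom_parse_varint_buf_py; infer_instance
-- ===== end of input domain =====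

-- B replaces A's interleaved or/shift accumulation loop by a collect-then-combine
-- two-pass (gather 7-bit payloads, then sum them shifted); alternative decomposition, same cost.


-- ===== PORT A =====
-- for i in range(5): check 'offset >= len(data)' (raise), read data[offset] (pyGet?:
-- none = IndexError for offset < -len), or the masked shifted byte into result,
-- return on a clear 0x80 bit; none = the ValueError/IndexError raise paths.
def pvGoA (data : List Int) (result offset : Int) (i : Nat) : Option (Int × Int) :=
  if 5 ≤ i then none  -- loop exhausted: raise ValueError("varint too long")
  else if (data.length : Int) ≤ offset then none  -- raise ValueError("buffer too short")
  else
    match PySem.List.pyGet? data offset with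
    | none => none  -- IndexError (offset < -len(data))
    | some val =>
      let offset' := offset + 1
      let result' := PySem.Int.bor result ((PySem.Int.band val 127) <<< (7 * i))
      if PySem.Int.band val 128 = 0 then some (result', offset')
      else pvGoA data result' offset' (i + 1)
  termination_by 5 - i
  decreasing_by omega

def parse_varint_buf_py (data : List Int) (offset : Int) : Int × Int :=
  (pvGoA data 0 offset 0).getD (0, 0)  -- none = Python raises; excluded by Pre_

-- ===== PORT B =====
-- Pass 1 of Source B: the while-loop collecting payloads 'val & 0x7F' (same checks,
-- same order as the Python); none = the raise paths.
def pvCollect (data : List Int) (offset : Int) (payloads : List Int) : Option (List Int × Int) :=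
  if (data.length : Int) ≤ offset then none  -- raise ValueError("buffer too short")
  else
    match PySem.List.pyGet? data offset with
    | none => none  -- IndexError (offset < -len(data))
    | some val =>
      if PySem.Int.band val 128 = 0 then some (payloads ++ [PySem.Int.band val 127], offset + 1)
      else if 5 ≤ (payloads ++ [PySem.Int.band val 127]).length then none  -- raise ValueError("varint too long")
      else pvCollect data (offset + 1) (payloads ++ [PySem.Int.band val 127])
  termination_by 5 - payloads.length
  decreasing_by simp only [List.length_append, List.length_singleton] at *; omega

-- Pass 2 of Source B: result = sum(p << (7*i) for i, p in enumerate(payloads)).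
-- (.toNat on the enumerate index is exact: indices from enumerate _ 0 are ≥ 0.)
def parse_varint_buf_py_alt (data : List Int) (offset : Int) : Int × Int :=
  match pvCollect data offset [] with
  | none => (0, -1)  -- Python raises here; excluded by Pre_
  | some (ps, off) =>
      (((PySem.List.enumerate ps).map (fun ip => ip.2 <<< (7 * ip.1).toNat)).sum, off)

-- ===== PRECONDITION & SPEC =====
-- the byte A would read in iteration j: A's own bound check, then Python indexing
def pvByte (data : List Int) (offset : Int) (j : Nat) : Option Int :=
  if (data.length : Int) ≤ offset + (j : Int) then none
  else PySem.List.pyGet? data (offset + (j : Int))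
def pvContB (data : List Int) (offset : Int) (j : Nat) : Bool :=
  match pvByte data offset j with
  | some v => PySem.Int.band v 128 != 0
  | none => false
def pvEndB (data : List Int) (offset : Int) (j : Nat) : Bool :=
  match pvByte data offset j with
  | some v => PySem.Int.band v 128 == 0
  | none => false
-- Pre_ excludes exactly the inputs where the Python A raises (ValueError "buffer too
-- short"/"varint too long", or IndexError for offset < -len(data)): it requires a
-- terminating byte (0x80 bit clear) within the first 5 readable bytes from offset.
def Pre_parse_varint_buf_py (data : List Int) (offset : Int) : Prop :=
  ∃ k < 5, (∀ j < k, pvContB data offset j = true) ∧ pvEndB data offset k = true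
instance (data : List Int) (offset : Int) : Decidable (Pre_parse_varint_buf_py data offset) := by unfold Pre_parse_varint_buf_py; infer_instance

def pvWitness_parse_varint_buf_py : List Int × Int := ([130, 5], 0)

def Spec_parse_varint_buf_py (data : List Int) (offset : Int) (out : Int × Int) : Prop := out = parse_varint_buf_py_alt data offset
instance (data : List Int) (offset : Int) (out : Int × Int) : Decidable (Spec_parse_varint_buf_py data offset out) := by unfold Spec_parse_varint_buf_py; infer_instance

-- ===== CLAIM (what is proved, stated in full; the proofs are below) =====
def Claim_equal_parse_varint_buf_py : Prop := ∀ (data : List Int) (offset : Int), Dom_parse_varint_buf_py data offset → Pre_parse_varint_buf_py data offset → Spec_parse_varint_buf_py data offset (parse_varint_buf_py data offset)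

-- ===== LEMMAS AND PROOFS =====

-- B's pass-2 combination, as a named function for the proofs
def pvVal (ps : List Int) : Int :=
  ((PySem.List.enumerate ps).map (fun ip => ip.2 <<< (7 * ip.1).toNat)).sum

theorem pv_nat_lor_add : ∀ (n x y : Nat), x < 2^n → x ||| (y <<< n) = x + (y <<< n) := by
  intro n
  induction n with
  | zero => intro x y hx; interval_cases x; simp
  | succ n ih =>
    intro x y hx
    rw [← Nat.bit_testBit_zero_shiftRight_one x]
    have hlt : x >>> 1 < 2 ^ n := by
      rw [Nat.shiftRight_one]; omega
    have h2 : y <<< (n+1) = Nat.bit false (y <<< n) := by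
      simp [Nat.bit, Nat.shiftLeft_succ]
    rw [h2, Nat.lor_bit, ih _ y hlt]
    rcases (x.testBit 0) with _|_ <;> simp [Nat.bit] <;> omega

theorem pv_int_bor_add (a b : Int) (n : Nat) (h0 : 0 ≤ a) (h1 : a < 2^n) (hb : 0 ≤ b) :
    PySem.Int.bor a (b <<< n) = a + b <<< n := by
  have hbs : b <<< n = ((b.toNat * 2^n : Nat) : Int) := by
    rw [Int.shiftLeft_eq]; push_cast; rw [Int.toNat_of_nonneg hb]
  have hs : (0:Int) ≤ b <<< n := by rw [hbs]; positivity
  have hx : a.toNat < 2 ^ n := by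
    have : ((2^n : Nat) : Int) = 2^n := by push_cast; ring
    omega
  have hts : (b <<< n).toNat = b.toNat * 2^n := by rw [hbs]; exact Int.toNat_natCast _
  have hp := pv_nat_lor_add n a.toNat b.toNat hx
  rw [Nat.shiftLeft_eq] at hp
  rw [PySem.Int.bor_of_nonneg h0 hs, hts, hp, hbs]
  push_cast
  omega

theorem pv_band127 (v : Int) : 0 ≤ PySem.Int.band v 127 ∧ PySem.Int.band v 127 < 128 := by
  unfold PySem.Int.band
  have h127 : (127:Int).toNat = 127 := rfl
  split_ifs with h1 h2 h2
  · rw [h127]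
    have := Nat.and_le_right (n := v.toNat) (m := 127)
    constructor
    · positivity
    · omega
  · omega
  · rw [h127]
    have := Nat.and_le_left (n := 127) (m := (-v - 1).toNat)
    constructor
    · positivity
    · omega
  · omega

theorem pvVal_nil : pvVal [] = 0 := by
  simp [pvVal, PySem.List.enumerate]

theorem pvVal_append (ps : List Int) (x : Int) :
    pvVal (ps ++ [x]) = pvVal ps + x <<< (7 * ps.length) := by
  unfold pvVal
  rw [PySem.List.enumerate_append]
  simp [PySem.List.enumerate_cons, PySem.List.enumerate_nil]
  have h : ((7 : Int) * (ps.length : Int)).toNat = 7 * ps.length := by omega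
  rw [h]

theorem pvVal_bounds (ps : List Int) (h : ∀ p ∈ ps, 0 ≤ p ∧ p < 128) :
    0 ≤ pvVal ps ∧ pvVal ps < (2:Int) ^ (7 * ps.length) := by
  induction ps using List.reverseRecOn with
  | nil => simp [pvVal_nil]
  | append_singleton ps x ih =>
    have hx := h x (by simp)
    have hps := ih (fun p hp => h p (by simp [hp]))
    rw [pvVal_append, Int.shiftLeft_eq]
    have hpow : (0:Int) < 2 ^ (7 * ps.length) := by positivity
    have hmul : x * 2 ^ (7 * ps.length) ≤ 127 * 2 ^ (7 * ps.length) :=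
      mul_le_mul_of_nonneg_right (by omega) (le_of_lt hpow)
    have hpow2 : (2:Int) ^ (7 * (ps ++ [x]).length) = 128 * 2 ^ (7 * ps.length) := by
      simp [List.length_append, Nat.mul_add, pow_add]
      ring
    rw [hpow2]
    constructor
    · nlinarith [hx.1, hps.1]
    · nlinarith [hps.2]

theorem pv_go_collect (data : List Int) :
    ∀ (n : Nat) (offset : Int) (ps : List Int), ps.length + n = 4 →
      (∀ p ∈ ps, 0 ≤ p ∧ p < 128) →
      pvGoA data (pvVal ps) offset ps.length =
        (pvCollect data offset ps).map (fun r => (pvVal r.1, r.2)) := by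
  intro n
  induction n with
  | zero =>
    intro offset ps hlen hmem
    have hv := pvVal_bounds ps hmem
    rw [pvGoA, pvCollect]
    rw [if_neg (by omega : ¬ 5 ≤ ps.length)]
    by_cases hshort : (data.length:Int) ≤ offset
    · simp [hshort]
    · rw [if_neg hshort, if_neg hshort]
      cases hget : PySem.List.pyGet? data offset with
      | none => simp
      | some val =>
        have hb := pv_band127 val
        have hacc : PySem.Int.bor (pvVal ps) ((PySem.Int.band val 127) <<< (7 * ps.length))
            = pvVal (ps ++ [PySem.Int.band val 127]) := by
          rw [pvVal_append, pv_int_bor_add _ _ _ hv.1 hv.2 hb.1]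
        by_cases hbit : PySem.Int.band val 128 = 0
        · simp only [Option.map_some, if_pos hbit, hacc]
        · simp only [if_neg hbit]
          have h5 : 5 ≤ (ps ++ [PySem.Int.band val 127]).length := by simp; omega
          rw [if_pos h5, pvGoA, if_pos (by omega : 5 ≤ ps.length + 1)]
          simp
  | succ n ih =>
    intro offset ps hlen hmem
    have hv := pvVal_bounds ps hmem
    rw [pvGoA, pvCollect]
    rw [if_neg (by omega : ¬ 5 ≤ ps.length)]
    by_cases hshort : (data.length:Int) ≤ offset
    · simp [hshort]
    · rw [if_neg hshort, if_neg hshort]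
      cases hget : PySem.List.pyGet? data offset with
      | none => simp
      | some val =>
        have hb := pv_band127 val
        have hacc : PySem.Int.bor (pvVal ps) ((PySem.Int.band val 127) <<< (7 * ps.length))
            = pvVal (ps ++ [PySem.Int.band val 127]) := by
          rw [pvVal_append, pv_int_bor_add _ _ _ hv.1 hv.2 hb.1]
        by_cases hbit : PySem.Int.band val 128 = 0
        · simp only [Option.map_some, if_pos hbit, hacc]
        · simp only [if_neg hbit]
          rw [if_neg (by simp; omega : ¬ 5 ≤ (ps ++ [PySem.Int.band val 127]).length)]
          have hmem' : ∀ p ∈ ps ++ [PySem.Int.band val 127], 0 ≤ p ∧ p < 128 := by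
            intro p hp
            rcases List.mem_append.mp hp with h | h
            · exact hmem p h
            · simp at h; subst h; exact hb
          have hlen' : (ps ++ [PySem.Int.band val 127]).length + n = 4 := by simp; omega
          have := ih (offset + 1) (ps ++ [PySem.Int.band val 127]) hlen' hmem'
          rw [hacc]
          have hL : (ps ++ [PySem.Int.band val 127]).length = ps.length + 1 := by simp
          rw [hL] at this
          exact this

theorem pvByte_shift (data : List Int) (offset : Int) (j : Nat) :
    pvByte data (offset + 1) j = pvByte data offset (j + 1) := by
  unfold pvByte
  have h : offset + 1 + (j:Int) = offset + ((j:Int) + 1) := by ring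
  push_cast
  rw [h]

theorem pvContB_shift (data : List Int) (offset : Int) (j : Nat) :
    pvContB data (offset + 1) j = pvContB data offset (j + 1) := by
  unfold pvContB; rw [pvByte_shift]

theorem pvEndB_shift (data : List Int) (offset : Int) (j : Nat) :
    pvEndB data (offset + 1) j = pvEndB data offset (j + 1) := by
  unfold pvEndB; rw [pvByte_shift]

theorem pv_collect_some (data : List Int) :
    ∀ (k : Nat), k < 5 → ∀ (offset : Int) (ps : List Int), ps.length + k < 5 →
      (∀ j < k, pvContB data offset j = true) → pvEndB data offset k = true →
      (pvCollect data offset ps).isSome := by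
  intro k
  induction k with
  | zero =>
    intro _ offset ps hlen hc he
    unfold pvEndB pvByte at he
    simp only [Nat.cast_zero, add_zero] at he
    rw [pvCollect]
    by_cases hshort : (data.length:Int) ≤ offset
    · rw [if_pos hshort] at he; simp at he
    · rw [if_neg hshort] at he ⊢
      cases hget : PySem.List.pyGet? data offset with
      | none => rw [hget] at he; simp at he
      | some v =>
        rw [hget] at he
        simp only [beq_iff_eq] at he
        simp [he]
  | succ k ih =>
    intro hk5 offset ps hlen hc he
    have hc0 := hc 0 (by omega)
    unfold pvContB pvByte at hc0
    simp only [Nat.cast_zero, add_zero] at hc0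
    rw [pvCollect]
    by_cases hshort : (data.length:Int) ≤ offset
    · rw [if_pos hshort] at hc0; simp at hc0
    · rw [if_neg hshort] at hc0 ⊢
      cases hget : PySem.List.pyGet? data offset with
      | none => rw [hget] at hc0; simp at hc0
      | some v =>
        rw [hget] at hc0
        simp only [bne_iff_ne, ne_eq] at hc0
        have h5 : ¬ 5 ≤ (ps ++ [PySem.Int.band v 127]).length := by simp; omega
        simp only [if_neg hc0, if_neg h5]
        apply ih (by omega) (offset + 1) (ps ++ [PySem.Int.band v 127]) (by simp; omega)
        · intro j hj
          rw [pvContB_shift]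
          exact hc (j + 1) (by omega)
        · rw [pvEndB_shift]
          exact he

-- ===== VERDICT (by name: the statement is the Claim_ definition above) =====
theorem parse_varint_buf_py_spec : Claim_equal_parse_varint_buf_py := by
  intro data offset _ hpre
  unfold Spec_parse_varint_buf_py
  obtain ⟨k, hk, hc, he⟩ := hpre
  have hsome := pv_collect_some data k hk offset [] (by simpa using hk) hc he
  have hmain := pv_go_collect data 4 offset [] rfl (by simp)
  rw [pvVal_nil] at hmain
  unfold parse_varint_buf_py parse_varint_buf_py_alt
  simp only [List.length_nil] at hmain
  rw [hmain]
  cases hcol : pvCollect data offset [] with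
  | none => rw [hcol] at hsome; simp at hsome
  | some r =>
    cases r with
    | mk ps off => simp [pvVal]
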